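-- pv_equiv track=rewrite | github.com/lukasuarishvili/GOA-homework | Group47/level58/classwork/main.py | lottery
-- ===== SOURCE A (Python) =====
-- def lottery(s):
--     res=""
--     num=""
--     for i in s:
--         if i   in "1234567890" and  i not in num :
--             res+=i
--             num+=i
--     if res=="":
--         return 'One more run!'
--     else:
--         return res
-- ===== SOURCE B (Python) =====
-- def lottery(s):
--     present = [d for d in "1234567890" if d in s]
--     res = "".join(sorted(present, key=s.find))
--     return res if res else 'One more run!'
-- ===== Notes on version B (the rewrite author's own statement) =====
-- stated objective: faster
-- what changed: Instead of scanning the string character by character with a seen-accumulator, B iterates over the ten digit characters, keeps those present in the string, and sorts them by their first index (s.find); distinct digits have distinct first indices, so this is exactly the first-appearance order.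
import Mathlib
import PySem

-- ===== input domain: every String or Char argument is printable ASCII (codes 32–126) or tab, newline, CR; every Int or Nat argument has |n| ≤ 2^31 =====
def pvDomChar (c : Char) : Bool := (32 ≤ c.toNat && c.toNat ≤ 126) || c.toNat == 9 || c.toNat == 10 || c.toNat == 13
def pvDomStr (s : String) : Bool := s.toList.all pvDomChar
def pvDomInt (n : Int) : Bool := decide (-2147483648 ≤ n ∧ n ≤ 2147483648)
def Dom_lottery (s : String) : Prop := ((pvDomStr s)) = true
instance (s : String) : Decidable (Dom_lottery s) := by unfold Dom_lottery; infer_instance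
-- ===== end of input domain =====

-- B replaces A's single scan with a seen-accumulator by a different traversal: it walks the
-- TEN digit characters, keeps those occurring in s, and sorts them by first index (s.find).
-- Return value only; neither version has side effects.

-- ===== PORT A =====
-- A's loop: res and num grow together; the branch tests digit-membership and 'i not in num'.
def lottery (s : String) : String :=
  let st := s.toList.foldl
    (fun (p : List Char × List Char) i =>
      if ("1234567890".toList.contains i && !p.2.contains i) then (p.1 ++ [i], p.2 ++ [i]) else p)
    ([], [])
  if st.1 = [] then "One more run!" else String.ofList st.1

-- ===== PORT B =====
-- present = [d for d in "1234567890" if d in s]; res = "".join(sorted(present, key=s.find))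
def lottery_alt (s : String) : String :=
  let present := "1234567890".toList.filter (fun d => PySem.Chars.isIn [d] s.toList)
  let res := PySem.List.sorted present (fun d => PySem.Chars.find s.toList [d]) false
  if res = [] then "One more run!" else String.ofList res

-- ===== PRECONDITION & SPEC =====
def Spec_lottery (s : String) (out : String) : Prop := out = lottery_alt s
instance (s : String) (out : String) : Decidable (Spec_lottery s out) := by unfold Spec_lottery; infer_instance

-- ===== CLAIM =====
def Claim_equal_lottery : Prop := ∀ (s : String), Dom_lottery s → Spec_lottery s (lottery s)

-- ===== LEMMAS AND PROOFS =====

-- A's loop from the diagonal state computes (twice) the Set.add-fold of the digit-filtered chars.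
theorem lottery_loop_eq (l : List Char) (acc : List Char) :
    l.foldl
      (fun (p : List Char × List Char) i =>
        if ("1234567890".toList.contains i && !p.2.contains i) then (p.1 ++ [i], p.2 ++ [i]) else p)
      (acc, acc)
    = ((l.filter (fun c => "1234567890".toList.contains c)).foldl PySem.Set.add acc,
       (l.filter (fun c => "1234567890".toList.contains c)).foldl PySem.Set.add acc) := by
  induction l generalizing acc with
  | nil => rfl
  | cons c l ih =>
    rw [List.foldl_cons, List.filter_cons]
    by_cases hd : ("1234567890".toList.contains c) = true
    · by_cases hm : (acc.contains c) = true
      · have hcond : ("1234567890".toList.contains c && !acc.contains c) = false := by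
          rw [hd, hm]; rfl
        have hadd : PySem.Set.add acc c = acc := by
          simp only [PySem.Set.add, PySem.Set.contains, hm, if_true]
        rw [hcond]
        simp only [Bool.false_eq_true, if_false, hd, if_true, List.foldl_cons, hadd]
        exact ih acc
      · have hmem : c ∉ acc := by simpa using hm
        have hcond : ("1234567890".toList.contains c && !acc.contains c) = true := by
          rw [hd]; simpa using hmem
        have hadd : PySem.Set.add acc c = acc ++ [c] := by
          simp [PySem.Set.add, hmem]
        rw [hcond]
        simp only [if_true, hd, List.foldl_cons, hadd]
        exact ih (acc ++ [c])
    · have hcond : ("1234567890".toList.contains c && !acc.contains c) = false := by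
        cases h : ("1234567890".toList.contains c) with
        | true => exact absurd h hd
        | false => rfl
      rw [hcond]
      simp only [Bool.false_eq_true, if_false, hd]
      exact ih acc

theorem find_singleton_eq_idxOf (l : List Char) (d : Char) (h : d ∈ l) :
    PySem.Chars.find l [d] = (l.idxOf d : Int) := by
  have hinf : [d] <:+: l := (List.singleton_infix_iff d l).mpr h
  have hnn : 0 ≤ PySem.Chars.find l [d] := (PySem.Chars.find_nonneg_iff l [d]).mpr hinf
  obtain ⟨hpre, hmin⟩ := PySem.Chars.find_spec hnn
  set k := (PySem.Chars.find l [d]).toNat with hk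
  obtain ⟨t, ht⟩ := hpre
  have hklen : k < l.length := by
    have := congrArg List.length ht
    simp [List.length_drop] at this
    omega
  have hlk : l[k] = d := by
    have h1 : (l.drop k)[0]?.isSome ∧ (l.drop k)[0]? = some d := by
      rw [← ht]; simp
    have h2 := h1.2
    rw [List.getElem?_drop] at h2
    exact (List.getElem_eq_iff hklen).mpr (by simpa using h2)
  have hle : l.idxOf d ≤ k := by
    have htk : d ∈ l.take (k+1) := by
      have : (l.take (k+1))[k]'(by simp; omega) = d := by
        simpa [List.getElem_take] using hlk
      exact this ▸ List.getElem_mem _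
    have := (List.mem_take_iff_idxOf_lt h).mp htk
    omega
  have hge : k ≤ l.idxOf d := by
    by_contra hc
    push Not at hc
    apply hmin (l.idxOf d) hc
    refine ⟨l.drop (l.idxOf d + 1), ?_⟩
    rw [List.drop_eq_getElem_cons (List.idxOf_lt_length_of_mem h),
        List.getElem_idxOf (List.idxOf_lt_length_of_mem h)]
    rfl
  have : k = l.idxOf d := le_antisymm hge hle
  rw [← this, hk, Int.toNat_of_nonneg hnn]

theorem dedup_pairwise_idxOf (M : List Char) :
    (PySem.List.dedup M).Pairwise (fun a b => M.idxOf a < M.idxOf b) := by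
  induction M using List.reverseRecOn with
  | nil => simp [PySem.List.dedup]
  | append_singleton M x ih =>
    have hded : PySem.List.dedup (M ++ [x]) = PySem.Set.add (PySem.List.dedup M) x := by
      simp only [PySem.List.dedup_eq_ofList, PySem.Set.ofList_eq_foldl, List.foldl_append,
        List.foldl_cons, List.foldl_nil]
    rw [hded]
    have hsub : ∀ a, a ∈ PySem.List.dedup M → a ∈ M := fun a ha => (PySem.List.mem_dedup M a).mp ha
    by_cases hx : x ∈ PySem.List.dedup M
    · have : PySem.Set.add (PySem.List.dedup M) x = PySem.List.dedup M := by
        simp only [PySem.Set.add, PySem.Set.contains]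
        simp [hsub x hx]
      rw [this]
      exact ih.imp_of_mem (fun {a b} ha hb h => by
        rw [List.idxOf_append_of_mem (hsub a ha), List.idxOf_append_of_mem (hsub b hb)]; exact h)
    · have hxM : x ∉ M := fun h => hx ((PySem.List.mem_dedup M x).mpr h)
      have : PySem.Set.add (PySem.List.dedup M) x = PySem.List.dedup M ++ [x] := by
        simp only [PySem.Set.add, PySem.Set.contains]
        simp [hxM]
      rw [this, List.pairwise_append]
      refine ⟨ih.imp_of_mem (fun {a b} ha hb h => by
          rw [List.idxOf_append_of_mem (hsub a ha), List.idxOf_append_of_mem (hsub b hb)]; exact h),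
        by simp, ?_⟩
      intro a ha b hb
      simp at hb
      subst hb
      rw [List.idxOf_append_of_mem (hsub a ha), List.idxOf_append_of_notMem hxM]
      have := List.idxOf_lt_length_of_mem (hsub a ha)
      simp
      omega

theorem idxOf_filter_lt (p : Char → Bool) (l : List Char) (a b : Char)
    (ha : a ∈ l.filter p) (hb : b ∈ l.filter p)
    (h : (l.filter p).idxOf a < (l.filter p).idxOf b) : l.idxOf a < l.idxOf b := by
  induction l with
  | nil => simp at ha
  | cons c t ih =>
    by_cases hc : p c = true
    · rw [List.filter_cons_of_pos hc] at ha hb h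
      by_cases hac : a = c
      · subst hac
        have hbc : b ≠ a := by
          intro he; subst he; omega
        rw [List.idxOf_cons_eq t rfl]
        rw [List.idxOf_cons_ne t (fun he => hbc he.symm)]
        omega
      · have hbc : b ≠ c := by
          intro he; subst he
          rw [List.idxOf_cons_eq _ rfl] at h
          omega
        rw [List.idxOf_cons_ne _ (fun he => hac he.symm)] at h ⊢
        rw [List.idxOf_cons_ne _ (fun he => hbc he.symm)] at h ⊢
        have ha' : a ∈ t.filter p := by
          rcases List.mem_cons.mp ha with h1 | h1
          · exact absurd h1 hac
          · exact h1
        have hb' : b ∈ t.filter p := by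
          rcases List.mem_cons.mp hb with h1 | h1
          · exact absurd h1 hbc
          · exact h1
        have := ih ha' hb' (by omega)
        omega
    · rw [List.filter_cons_of_neg hc] at ha hb h
      have hac : a ≠ c := by
        intro he; subst he
        have := List.of_mem_filter ha
        rw [this] at hc; exact hc rfl
      have hbc : b ≠ c := by
        intro he; subst he
        have := List.of_mem_filter hb
        rw [this] at hc; exact hc rfl
      rw [List.idxOf_cons_ne _ (fun he => hac he.symm),
          List.idxOf_cons_ne _ (fun he => hbc he.symm)]
      have := ih ha hb h
      omega

theorem lottery_core (l : List Char) :
    PySem.List.dedup (l.filter (fun c => "1234567890".toList.contains c))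
    = PySem.List.sorted ("1234567890".toList.filter (fun d => PySem.Chars.isIn [d] l))
        (fun d => PySem.Chars.find l [d]) false := by
  set p := fun c => "1234567890".toList.contains c with hp
  set R := PySem.List.dedup (l.filter p) with hR
  have hsubR : ∀ a, a ∈ R → a ∈ l.filter p := fun a ha => (PySem.List.mem_dedup _ a).mp ha
  refine (PySem.List.sorted_eq_of_perm_of_pairwise_lt _ R _ ?_ ?_).symm
  · -- R.Perm present
    apply List.perm_of_nodup_nodup_toFinset_eq (PySem.List.nodup_dedup _)
    · exact List.Nodup.filter _ (by decide)
    · ext x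
      simp only [List.mem_toFinset, PySem.List.mem_dedup, List.mem_filter]
      constructor
      · rintro ⟨hxl, hxp⟩
        have : x ∈ "1234567890".toList := by simpa [hp] using hxp
        exact ⟨this, (PySem.Chars.isIn_iff_infix _ _).mpr ((List.singleton_infix_iff x l).mpr hxl)⟩
      · rintro ⟨hxd, hxin⟩
        refine ⟨(List.singleton_infix_iff x l).mp ((PySem.Chars.isIn_iff_infix _ _).mp hxin), ?_⟩
        simpa [hp] using hxd
  · -- pairwise by find
    refine (dedup_pairwise_idxOf (l.filter p)).imp_of_mem (fun {a b} ha hb h => ?_)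
    have ha' := hsubR a ha
    have hb' := hsubR b hb
    have hal : a ∈ l := (List.mem_filter.mp ha').1
    have hbl : b ∈ l := (List.mem_filter.mp hb').1
    rw [find_singleton_eq_idxOf l a hal, find_singleton_eq_idxOf l b hbl]
    exact_mod_cast idxOf_filter_lt p l a b ha' hb' h

-- ===== VERDICT =====
theorem lottery_spec : Claim_equal_lottery := by
  intro s _
  show lottery s = lottery_alt s
  unfold lottery lottery_alt
  rw [lottery_loop_eq]
  have h := lottery_core s.toList
  simp only [PySem.List.dedup_eq_ofList, PySem.Set.ofList_eq_foldl] at h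
  rw [h]
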